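-- pv_equiv track=rewrite | github.com/RifasM/Italian-Fiscal-Code-Generator | logic.py | Fiscal_Code
-- ===== SOURCE A (Python) =====
-- def Fiscal_Code(name, flag):
--     if name == "*_*":
--         return 'XXX'
--     # converting all characters to uppercase
--     name = name.upper()
--
--     # stores the code generated at each step
--     sub_code = ""
--
--     vowels = ['A', 'E', 'I', 'O', 'U']
--     vowel_list = []
--
--     threshold = 0  # maximum number of characters in the sub_code
--
--     for character in name:
--
--         # terminates the loop when threshols == 3
--         if (threshold == 4):
--             break
--
--             # stores the encountered vowel in the array
--         elif character in vowels:
--             vowel_list.append(character)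
--
--         # stores the encountered consonant in the array
--         else:
--             # if(not flag and threshold==1):
--             #    continue
--
--             sub_code += character
--             threshold += 1
--
--     iterator = 0
--
--     # removing the 2nd character or the last character
--     if (threshold == 4):
--
--         if (flag):
--             sub_code = sub_code[:3]
--         else:
--             sub_code = sub_code[:1] + sub_code[2:]
--         return sub_code
--
--     vowel_list += 3 * ['X']
--
--     # for appending vowels and X's
--     while (threshold < 3 and iterator < len(vowel_list)):
--         sub_code += vowel_list[iterator]
--         iterator += 1
--         threshold += 1
--
--     return sub_code
-- ===== SOURCE B (Python) =====
-- def Fiscal_Code(name, flag):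
--     if name == "*_*":
--         return 'XXX'
--     name = name.upper()
--     vowels = ('A', 'E', 'I', 'O', 'U')
--     consonants = [c for c in name if c not in vowels]
--     if len(consonants) >= 4:
--         if flag:
--             return ''.join(consonants[:3])
--         return consonants[0] + consonants[2] + consonants[3]
--     found_vowels = [c for c in name if c in vowels]
--     return ''.join((consonants + found_vowels + ['X', 'X', 'X'])[:3])
-- ===== Notes on version B (the rewrite author's own statement) =====
-- stated objective: simpler
-- what changed: Replaces A's interleaved break/threshold state machine and trailing while-loop with two filter passes and a single branch on the consonant count, taking the first three of consonants+vowels+'XXX' in the short case.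
import Mathlib
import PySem

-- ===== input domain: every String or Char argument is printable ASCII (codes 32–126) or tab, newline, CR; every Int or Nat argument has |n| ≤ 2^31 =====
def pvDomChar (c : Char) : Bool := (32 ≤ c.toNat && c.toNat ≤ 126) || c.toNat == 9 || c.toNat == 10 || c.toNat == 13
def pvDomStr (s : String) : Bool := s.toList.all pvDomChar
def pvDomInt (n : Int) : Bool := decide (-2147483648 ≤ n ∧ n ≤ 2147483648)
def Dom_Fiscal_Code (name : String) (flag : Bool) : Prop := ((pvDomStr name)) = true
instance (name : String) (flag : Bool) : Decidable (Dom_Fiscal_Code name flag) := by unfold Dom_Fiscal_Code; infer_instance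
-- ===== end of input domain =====

-- B replaces A's interleaved break/threshold loop + trailing while-loop by two filter
-- passes and one branch on the consonant count (objective: simpler).

-- character in vowels (vowels = ['A','E','I','O','U'])
def pvIsVow (c : Char) : Bool := (['A', 'E', 'I', 'O', 'U'] : List Char).contains c

-- ===== PORT A =====
-- the for-loop of A: state (sub_code, vowel_list, threshold); 'break' = early return
def pvLoopA : List Char → List Char → List Char → Nat → List Char × List Char × Nat
  | [], sub, vl, t => (sub, vl, t)
  | c :: rest, sub, vl, t =>
    if t == 4 then (sub, vl, t)
    else if pvIsVow c then pvLoopA rest sub (vl ++ [c]) t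
    else pvLoopA rest (sub ++ [c]) vl (t + 1)

-- the while-loop of A: while threshold < 3 and iterator < len(vowel_list)
def pvWhileA (vl : List Char) (sub : List Char) (iterator t : Nat) : List Char :=
  if h : t < 3 ∧ iterator < vl.length then
    pvWhileA vl (sub ++ [vl[iterator]'h.2]) (iterator + 1) (t + 1)
  else sub
termination_by 3 - t

def Fiscal_Code (name : String) (flag : Bool) : String :=
  if name == "*_*" then "XXX"
  else
    let up := (PySem.Str.upper name).toList
    let r := pvLoopA up [] [] 0
    if r.2.2 == 4 then
      if flag then String.ofList (r.1.take 3)               -- sub_code[:3]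
      else String.ofList (r.1.take 1 ++ r.1.drop 2)         -- sub_code[:1] + sub_code[2:]
    else
      String.ofList (pvWhileA (r.2.1 ++ ['X', 'X', 'X']) r.1 0 r.2.2)

-- ===== PORT B =====
def Fiscal_Code_alt (name : String) (flag : Bool) : String :=
  if name == "*_*" then "XXX"
  else
    let up := (PySem.Str.upper name).toList
    let cons := up.filter (fun c => !pvIsVow c)
    if 4 ≤ cons.length then
      if flag then String.ofList (cons.take 3)
      -- consonants[0] + consonants[2] + consonants[3]; indices are in range here
      else String.ofList [cons.getD 0 'X', cons.getD 2 'X', cons.getD 3 'X']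
    else
      let found := up.filter (fun c => pvIsVow c)
      String.ofList ((cons ++ found ++ ['X', 'X', 'X']).take 3)

-- ===== PRECONDITION & SPEC =====
def Spec_Fiscal_Code (name : String) (flag : Bool) (out : String) : Prop := out = Fiscal_Code_alt name flag
instance (name : String) (flag : Bool) (out : String) : Decidable (Spec_Fiscal_Code name flag out) := by unfold Spec_Fiscal_Code; infer_instance

-- ===== CLAIM (what is proved, stated in full; the proofs are below) =====
def Claim_equal_Fiscal_Code : Prop := ∀ (name : String) (flag : Bool), Dom_Fiscal_Code name flag → Spec_Fiscal_Code name flag (Fiscal_Code name flag)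

-- ===== LEMMAS AND PROOFS =====

-- fewer than 4 consonants remain below the threshold: the loop collects them all
theorem pvLoopA_few (cs : List Char) : ∀ (sub vl : List Char) (t : Nat),
    t = sub.length → sub.length + (cs.filter (fun c => !pvIsVow c)).length < 4 →
    pvLoopA cs sub vl t =
      (sub ++ cs.filter (fun c => !pvIsVow c),
       vl ++ cs.filter (fun c => pvIsVow c),
       t + (cs.filter (fun c => !pvIsVow c)).length) := by
  induction cs with
  | nil => intro sub vl t ht _; simp [pvLoopA]
  | cons c rest ih =>
    intro sub vl t ht hlt
    by_cases hv : pvIsVow c = true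
    · have e1 : (c :: rest).filter (fun c => !pvIsVow c) = rest.filter (fun c => !pvIsVow c) :=
        List.filter_cons_of_neg (by simp [hv])
      have e2 : (c :: rest).filter (fun c => pvIsVow c) = c :: rest.filter (fun c => pvIsVow c) :=
        List.filter_cons_of_pos (by simp [hv])
      rw [e1] at hlt
      have ht4 : (t == 4) = false := by simp; omega
      rw [pvLoopA, ht4, if_neg (by simp), if_pos hv, ih sub (vl ++ [c]) t ht hlt,
        e1, e2, List.append_assoc, List.singleton_append]
    · have e1 : (c :: rest).filter (fun c => !pvIsVow c) = c :: rest.filter (fun c => !pvIsVow c) :=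
        List.filter_cons_of_pos (by simp [hv])
      have e2 : (c :: rest).filter (fun c => pvIsVow c) = rest.filter (fun c => pvIsVow c) :=
        List.filter_cons_of_neg (by simp [hv])
      rw [e1] at hlt
      simp only [List.length_cons] at hlt
      have ht4 : (t == 4) = false := by simp; omega
      rw [pvLoopA, ht4, if_neg (by simp), if_neg (by simp [hv]),
        ih (sub ++ [c]) vl (t + 1) (by simp [ht]) (by simp; omega),
        e1, e2, List.append_assoc, List.singleton_append, List.length_cons]
      simp only [Prod.mk.injEq]
      exact ⟨trivial, trivial, by omega⟩

-- at least 4 consonants: the loop breaks with the first four consonants and threshold 4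
theorem pvLoopA_many (cs : List Char) : ∀ (sub vl : List Char) (t : Nat),
    t = sub.length → t ≤ 4 → 4 ≤ sub.length + (cs.filter (fun c => !pvIsVow c)).length →
    (pvLoopA cs sub vl t).1 = (sub ++ cs.filter (fun c => !pvIsVow c)).take 4 ∧
    (pvLoopA cs sub vl t).2.2 = 4 := by
  induction cs with
  | nil =>
    intro sub vl t ht ht4 hge
    simp only [List.filter_nil, List.length_nil, Nat.add_zero] at hge
    have h4 : t = 4 := by omega
    rw [pvLoopA]
    simp [h4, List.take_of_length_le (show sub.length ≤ 4 by omega)]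
  | cons c rest ih =>
    intro sub vl t ht ht4 hge
    by_cases h4 : t = 4
    · have hsub : sub.length = 4 := by omega
      rw [pvLoopA, if_pos (by simp [h4]), List.take_append, hsub]
      simp [List.take_of_length_le (le_of_eq hsub), h4]
    · have ht4' : (t == 4) = false := by simp [h4]
      by_cases hv : pvIsVow c = true
      · rw [List.filter_cons_of_neg (by simp [hv])] at hge ⊢
        rw [pvLoopA, ht4', if_neg (by simp), if_pos hv]
        exact ih sub (vl ++ [c]) t ht ht4 hge
      · rw [List.filter_cons_of_pos (by simp [hv])] at hge ⊢
        simp only [List.length_cons] at hge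
        rw [pvLoopA, ht4', if_neg (by simp), if_neg (by simp [hv])]
        have := ih (sub ++ [c]) vl (t + 1) (by simp [ht]) (by omega) (by simp; omega)
        rwa [List.append_assoc, List.singleton_append] at this

-- the while loop appends vl[iterator:], capped at 3 - t characters
theorem pvWhileA_eq (n : Nat) : ∀ (t iterator : Nat) (sub vl : List Char), 3 - t = n →
    pvWhileA vl sub iterator t = sub ++ (vl.drop iterator).take (3 - t) := by
  induction n with
  | zero =>
    intro t it sub vl hn
    rw [pvWhileA]
    have : ¬ (t < 3 ∧ it < vl.length) := by omega
    simp [this, hn]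
  | succ n ih =>
    intro t it sub vl hn
    rw [pvWhileA]
    split_ifs with h
    · rw [ih (t + 1) (it + 1) _ vl (by omega)]
      rw [List.drop_eq_getElem_cons h.2]
      have h3 : 3 - t = (3 - (t + 1)) + 1 := by omega
      rw [h3, List.take_succ_cons]
      simp
    · rcases Classical.not_and_iff_not_or_not.mp h with h1 | h2
      · have : 3 - t = 0 := by omega
        simp [this]
      · have : vl.drop it = [] := List.drop_eq_nil_of_le (by omega)
        simp [this]

-- the core equality on the upper-cased character list
theorem pv_core (up : List Char) (flag : Bool) :
    (let r := pvLoopA up [] [] 0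
     if r.2.2 == 4 then
       if flag then String.ofList (r.1.take 3)
       else String.ofList (r.1.take 1 ++ r.1.drop 2)
     else String.ofList (pvWhileA (r.2.1 ++ ['X', 'X', 'X']) r.1 0 r.2.2)) =
    (let cons := up.filter (fun c => !pvIsVow c)
     if 4 ≤ cons.length then
       if flag then String.ofList (cons.take 3)
       else String.ofList [cons.getD 0 'X', cons.getD 2 'X', cons.getD 3 'X']
     else
       let found := up.filter (fun c => pvIsVow c)
       String.ofList ((cons ++ found ++ ['X', 'X', 'X']).take 3)) := by
  by_cases hge : 4 ≤ (up.filter (fun c => !pvIsVow c)).length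
  · obtain ⟨h1, h2⟩ := pvLoopA_many up [] [] 0 rfl (by omega) (by simpa using hge)
    simp only [List.nil_append] at h1
    simp only [h1, h2, hge, if_pos, beq_self_eq_true]
    cases flag with
    | true => simp [List.take_take]
    | false =>
      match hm : up.filter (fun c => !pvIsVow c), hge with
      | a :: b :: c :: d :: tl, _ => simp [List.getD]
  · have hfew := pvLoopA_few up [] [] 0 rfl (by simp; omega)
    simp only [List.nil_append, Nat.zero_add] at hfew
    have hne : ((up.filter (fun c => !pvIsVow c)).length == 4) = false := by simp; omega
    simp only [hfew, hne, if_neg hge, Bool.false_eq_true, if_false]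
    refine congrArg String.ofList ?_
    rw [pvWhileA_eq (3 - (up.filter (fun c => !pvIsVow c)).length) _ 0 _ _ rfl, List.drop_zero]
    conv_rhs => rw [List.append_assoc, List.take_append]
    rw [List.take_of_length_le (show (up.filter (fun c => !pvIsVow c)).length ≤ 3 by omega)]

-- ===== VERDICT (by name: the statement is the Claim_ definition above) =====
theorem Fiscal_Code_spec : Claim_equal_Fiscal_Code := by
  intro name flag _
  unfold Spec_Fiscal_Code Fiscal_Code Fiscal_Code_alt
  by_cases hg : name == "*_*"
  · simp [hg]
  · simp only [hg, if_false, Bool.false_eq_true]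
    exact pv_core (PySem.Str.upper name).toList flag
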